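-- pv_equiv track=rewrite | github.com/fqueyroi/tulip_plugins | papers/NetFromSequentialData/PathwayDetectionSimple.py | get_cycles_pivot
-- ===== SOURCE A (Python) =====
-- def get_cycles_pivot(path, pivot):
--     res = []
--     ind = [i for i, x in enumerate(path) if x == pivot]
--     if ind[0] > 0:
--         res.append(path[:ind[0]])
--     if len(ind) >= 2:
--         for i in range(len(ind)-1):
--             res.append(path[ind[i]:ind[i+1]])
--     if ind[-1] < len(path)-1:
--         res.append(path[ind[-1]:])
--     else:
--         res.append([pivot])
--     return res
-- ===== SOURCE B (Python) =====
-- def get_cycles_pivot(path, pivot):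
--     if pivot not in path:
--         raise IndexError("pivot not found in path")
--     res = []
--     cur = []
--     for x in path:
--         if x == pivot:
--             if cur:
--                 res.append(cur)
--             cur = [x]
--         else:
--             cur.append(x)
--     res.append(cur)
--     return res
-- ===== Notes on version B (the rewrite author's own statement) =====
-- stated objective: simpler
-- what changed: Replaces index-collection (enumerate filter) plus three slicing phases with a single streaming pass that accumulates the current segment and flushes it at each pivot occurrence.
import Mathlib
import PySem

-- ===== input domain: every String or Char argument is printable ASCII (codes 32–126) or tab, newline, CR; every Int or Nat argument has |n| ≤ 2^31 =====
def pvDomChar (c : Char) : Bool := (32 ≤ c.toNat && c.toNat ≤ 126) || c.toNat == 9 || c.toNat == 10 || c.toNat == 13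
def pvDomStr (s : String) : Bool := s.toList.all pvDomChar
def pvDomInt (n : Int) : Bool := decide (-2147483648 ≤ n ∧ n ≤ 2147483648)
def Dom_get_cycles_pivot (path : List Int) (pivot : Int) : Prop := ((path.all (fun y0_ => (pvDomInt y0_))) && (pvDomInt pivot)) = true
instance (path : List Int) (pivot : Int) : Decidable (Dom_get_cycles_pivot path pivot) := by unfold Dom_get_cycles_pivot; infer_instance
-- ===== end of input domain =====

-- B replaces A's index-collection (enumerate+filter) and three slicing phases by a single
-- streaming pass accumulating the current segment (objective: simpler, same O(n) cost).


-- ===== PORT A =====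
def get_cycles_pivot (path : List Int) (pivot : Int) : List (List Int) :=
  let res : List (List Int) := []
  let ind : List Int := ((PySem.List.enumerate path 0).filter (fun p => p.2 == pivot)).map (fun p => p.1)
  -- ind[0] / ind[-1] raise IndexError when ind = [] (pivot absent); Pre_ excludes that
  let res := if PySem.List.pyGetD ind 0 0 > 0 then
      res ++ [PySem.List.slice path none (some (PySem.List.pyGetD ind 0 0))]
    else res
  let res := if ind.length ≥ 2 then
      (PySem.List.pyRange 0 ((ind.length : Int) - 1) 1).foldl
        (fun acc i => acc ++ [PySem.List.slice path (some (PySem.List.pyGetD ind i 0)) (some (PySem.List.pyGetD ind (i+1) 0))]) res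
    else res
  let res := if PySem.List.pyGetD ind (-1) 0 < (path.length : Int) - 1 then
      res ++ [PySem.List.slice path (some (PySem.List.pyGetD ind (-1) 0)) none]
    else res ++ [[pivot]]
  res

-- ===== PORT B =====
def get_cycles_pivot_alt (path : List Int) (pivot : Int) : List (List Int) :=
  if !(path.contains pivot) then []  -- Source B raises IndexError here; excluded by Pre_
  else
    let st := path.foldl
      (fun (st : List (List Int) × List Int) x =>
        if x == pivot then (if st.2.isEmpty then st.1 else st.1 ++ [st.2], [x])
        else (st.1, st.2 ++ [x])) ([], [])
    st.1 ++ [st.2]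

-- ===== PRECONDITION & SPEC =====
-- Pre_ excludes exactly the inputs where pivot does not occur in path: there A raises IndexError (ind[0])
def Pre_get_cycles_pivot (path : List Int) (pivot : Int) : Prop := pivot ∈ path
instance (path : List Int) (pivot : Int) : Decidable (Pre_get_cycles_pivot path pivot) := by unfold Pre_get_cycles_pivot; infer_instance
def pvWitness_get_cycles_pivot : List Int × Int := ([1, 2, 5, 3, 5, 4], 5)

def Spec_get_cycles_pivot (path : List Int) (pivot : Int) (out : List (List Int)) : Prop := out = get_cycles_pivot_alt path pivot
instance (path : List Int) (pivot : Int) (out : List (List Int)) : Decidable (Spec_get_cycles_pivot path pivot out) := by unfold Spec_get_cycles_pivot; infer_instance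

-- ===== CLAIM (what is proved, stated in full; the proofs are below) =====
def Claim_equal_get_cycles_pivot : Prop := ∀ (path : List Int) (pivot : Int), Dom_get_cycles_pivot path pivot → Pre_get_cycles_pivot path pivot → Spec_get_cycles_pivot path pivot (get_cycles_pivot path pivot)

-- ===== LEMMAS AND PROOFS =====

/-- positions (0-based) of `pivot` in a list, as naturals -/
def pvNatIdx (pivot : Int) : List Int → List Nat
  | [] => []
  | x :: xs => (if x = pivot then [0] else []) ++ (pvNatIdx pivot xs).map (· + 1)

/-- the slices between consecutive indices -/
def pvMids (path : List Int) : List Nat → List (List Int)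
  | a :: b :: rest => (path.drop a).take (b - a) :: pvMids path (b :: rest)
  | _ => []

theorem pvMids_single (path : List Int) (a : Nat) : pvMids path [a] = [] := rfl
theorem pvMids_cons₂ (path : List Int) (a b : Nat) (r : List Nat) :
    pvMids path (a :: b :: r) = (path.drop a).take (b - a) :: pvMids path (b :: r) := rfl

/-- the final segment of A -/
def pvLast (path : List Int) (pivot : Int) (ns : List Nat) : List (List Int) :=
  if ns.getLastD 0 + 1 < path.length then [path.drop (ns.getLastD 0)] else [[pivot]]

/-- index-free description of A's result -/
def pvS (path : List Int) (pivot : Int) : List (List Int) :=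
  (if 0 < (pvNatIdx pivot path).headD 0 then [path.take ((pvNatIdx pivot path).headD 0)] else [])
    ++ pvMids path (pvNatIdx pivot path) ++ pvLast path pivot (pvNatIdx pivot path)

/-- recursive segmenter: input starts with pivot -/
def pvGo (pivot : Int) : List Int → List (List Int)
  | [] => []
  | h :: t => (h :: t.takeWhile (fun x => x != pivot)) :: pvGo pivot (t.dropWhile (fun x => x != pivot))
termination_by l => l.length
decreasing_by
  simp only [List.length_cons]
  exact Nat.lt_succ_of_le (List.length_dropWhile_le _ _)

theorem pvNatIdx_eq_nil (pivot : Int) (u : List Int) (h : pivot ∉ u) : pvNatIdx pivot u = [] := by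
  induction u with
  | nil => rfl
  | cons x xs ih =>
    simp only [List.mem_cons, not_or] at h
    simp [pvNatIdx, ih h.2, Ne.symm h.1]

theorem pvNatIdx_append (pivot : Int) (u w : List Int) :
    pvNatIdx pivot (u ++ w) = pvNatIdx pivot u ++ (pvNatIdx pivot w).map (· + u.length) := by
  induction u with
  | nil => simp [pvNatIdx]
  | cons x xs ih =>
    simp [pvNatIdx, ih, List.map_map, Function.comp_def]
    intro a _
    omega

theorem pvNatIdx_ne_nil (pivot : Int) (path : List Int) (h : pivot ∈ path) : pvNatIdx pivot path ≠ [] := by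
  induction path with
  | nil => simp at h
  | cons x xs ih =>
    by_cases hx : x = pivot
    · simp [pvNatIdx, hx]
    · simp only [List.mem_cons] at h
      rcases h with h | h
      · exact absurd h.symm hx
      · simp only [pvNatIdx, hx, if_false, List.nil_append, ne_eq, List.map_eq_nil_iff]
        exact ih h

theorem pvMids_shift (path : List Int) (m : Nat) (ns : List Nat) :
    pvMids path (ns.map (· + m)) = pvMids (path.drop m) ns := by
  induction ns with
  | nil => rfl
  | cons a t ih =>
    cases t with
    | nil => rfl
    | cons b r =>
      simp only [List.map_cons] at ih ⊢
      simp only [pvMids, ih]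
      congr 1
      have h1 : b + m - (a + m) = b - a := by omega
      have h2 : (path.drop m).drop a = path.drop (a + m) := by
        rw [List.drop_drop]; congr 1; omega
      rw [h1, h2]

theorem pvLast_shift (path : List Int) (pivot : Int) (m : Nat) (ns : List Nat)
    (hns : ns ≠ []) (hm : m ≤ path.length) :
    pvLast path pivot (ns.map (· + m)) = pvLast (path.drop m) pivot ns := by
  have hgl : (ns.map (· + m)).getLastD 0 = ns.getLastD 0 + m := by
    cases hn : ns.getLast? with
    | none => exact absurd (List.getLast?_eq_none_iff.mp hn) hns
    | some v => simp [List.getLastD_eq_getLast?, List.getLast?_map, hn]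
  have h2 : (path.drop m).drop (ns.getLastD 0) = path.drop (ns.getLastD 0 + m) := by
    rw [List.drop_drop]; congr 1; omega
  unfold pvLast
  rw [hgl, List.length_drop, h2]
  by_cases hc : ns.getLastD 0 + 1 < path.length - m
  · rw [if_pos (by omega), if_pos hc]
  · rw [if_neg (by omega), if_neg hc]

theorem pvTakeWhile_of_not_mem (pivot : Int) (t : List Int) (h : pivot ∉ t) :
    t.takeWhile (fun x => x != pivot) = t ∧ t.dropWhile (fun x => x != pivot) = [] := by
  induction t with
  | nil => simp
  | cons x xs ih =>
    simp only [List.mem_cons, not_or] at h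
    have hx : (x != pivot) = true := by simp [bne_iff_ne]; exact fun hh => h.1 hh.symm
    simp [List.takeWhile_cons, List.dropWhile_cons, hx, ih h.2]

theorem pvDropWhile_mem (pivot : Int) (t : List Int) (h : pivot ∈ t) :
    ∃ v, t.dropWhile (fun x => x != pivot) = pivot :: v := by
  induction t with
  | nil => simp at h
  | cons x xs ih =>
    by_cases hx : x = pivot
    · exact ⟨xs, by simp [List.dropWhile_cons, hx]⟩
    · have hxs : pivot ∈ xs := by
        rcases List.mem_cons.mp h with h' | h'
        · exact absurd h'.symm hx
        · exact h'
      have hb : (x != pivot) = true := by simp [bne_iff_ne]; exact hx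
      rcases ih hxs with ⟨v, hv⟩
      exact ⟨v, by simp [List.dropWhile_cons, hb, hv]⟩

/-- head of pvNatIdx for a list starting with pivot -/
theorem pvNatIdx_cons_pivot (pivot : Int) (v : List Int) :
    pvNatIdx pivot (pivot :: v) = 0 :: (pvNatIdx pivot v).map (· + 1) := by
  simp [pvNatIdx]

/-- pvNatIdx of a pivot-headed cons after an unmatched prefix -/
theorem pvNatIdx_decomp (pivot : Int) (u v : List Int) (hu : pivot ∉ u) :
    pvNatIdx pivot (u ++ pivot :: v) =
      (pvNatIdx pivot (pivot :: v)).map (· + u.length) := by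
  rw [pvNatIdx_append, pvNatIdx_eq_nil pivot u hu, List.nil_append]

theorem pvGetLastD_cons_of_ne_nil (a : Nat) (l : List Nat) (h : l ≠ []) :
    (a :: l).getLastD 0 = l.getLastD 0 := by
  cases l with
  | nil => exact absurd rfl h
  | cons b t => simp [List.getLastD_cons]

/-- pvS on a pivot-headed list, pivot occurring again: peel one segment -/
theorem pvS_step (pivot : Int) (u v : List Int) (hu : pivot ∉ u) :
    pvS (pivot :: (u ++ pivot :: v)) pivot = (pivot :: u) :: pvS (pivot :: v) pivot := by
  have hns : pvNatIdx pivot (pivot :: (u ++ pivot :: v)) =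
      0 :: (pvNatIdx pivot (pivot :: v)).map (· + (u.length + 1)) := by
    rw [pvNatIdx_cons_pivot, pvNatIdx_decomp pivot u v hu, List.map_map]
    refine congrArg (0 :: ·) (List.map_congr_left ?_)
    intro k _
    show k + u.length + 1 = k + (u.length + 1)
    omega
  have hsplit : pivot :: (u ++ pivot :: v) = (pivot :: u) ++ (pivot :: v) := by simp
  have hlen : (pivot :: u).length = u.length + 1 := by simp
  have htake : (pivot :: (u ++ pivot :: v)).take (u.length + 1) = pivot :: u := by
    rw [hsplit, ← hlen, List.take_left]
  have hdrop : (pivot :: (u ++ pivot :: v)).drop (u.length + 1) = pivot :: v := by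
    rw [hsplit, ← hlen, List.drop_left]
  have hns₂cons : pvNatIdx pivot (pivot :: v) = 0 :: (pvNatIdx pivot v).map (· + 1) :=
    pvNatIdx_cons_pivot pivot v
  have hne₂ : pvNatIdx pivot (pivot :: v) ≠ [] := by rw [hns₂cons]; simp
  have hmapne : (pvNatIdx pivot (pivot :: v)).map (· + (u.length + 1)) ≠ [] := by simp [hne₂]
  have hx : (pvNatIdx pivot (pivot :: v)).map (· + (u.length + 1)) =
      (u.length + 1) :: ((pvNatIdx pivot v).map (· + 1)).map (· + (u.length + 1)) := by
    rw [hns₂cons]; simp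
  have hmid : pvMids (pivot :: (u ++ pivot :: v))
      (0 :: (pvNatIdx pivot (pivot :: v)).map (· + (u.length + 1))) =
      (pivot :: u) :: pvMids (pivot :: v) (pvNatIdx pivot (pivot :: v)) := by
    rw [hx, pvMids_cons₂, Nat.sub_zero, List.drop_zero, htake]
    congr 1
    rw [← hx, pvMids_shift, hdrop]
  have hlast : pvLast (pivot :: (u ++ pivot :: v)) pivot
      (0 :: (pvNatIdx pivot (pivot :: v)).map (· + (u.length + 1))) =
      pvLast (pivot :: v) pivot (pvNatIdx pivot (pivot :: v)) := by
    have h1 := pvLast_shift (pivot :: (u ++ pivot :: v)) pivot (u.length + 1)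
      (pvNatIdx pivot (pivot :: v)) hne₂
      (by simp only [List.length_cons, List.length_append]; omega)
    rw [hdrop] at h1
    rw [← h1]
    unfold pvLast
    rw [pvGetLastD_cons_of_ne_nil _ _ hmapne]
  unfold pvS
  rw [hns]
  have hhead₂ : (pvNatIdx pivot (pivot :: v)).headD 0 = 0 := by rw [hns₂cons]; rfl
  rw [hhead₂]
  simp only [List.headD_cons, lt_irrefl, if_false, List.nil_append]
  rw [hmid, hlast]
  simp

/-- pvS on a pivot-headed list with no further pivot -/
theorem pvS_base (pivot : Int) (t : List Int) (h : pivot ∉ t) :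
    pvS (pivot :: t) pivot = [pivot :: t] := by
  unfold pvS
  rw [pvNatIdx_cons_pivot, pvNatIdx_eq_nil pivot t h]
  cases t with
  | nil => simp [pvMids_single, pvLast]
  | cons y ys =>
    have hgl : ([(0 : Nat)] : List Nat).getLastD 0 = 0 := rfl
    simp only [List.map_nil, List.headD_cons, lt_irrefl, if_false, List.nil_append,
      pvMids_single, pvLast, hgl, List.length_cons, List.drop_zero]
    rw [if_pos (by omega)]

/-- KEY: on a pivot-headed list, pvS equals the recursive segmenter -/
theorem pvS_go (pivot : Int) : ∀ (n : Nat) (t : List Int), t.length ≤ n →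
    pvS (pivot :: t) pivot = pvGo pivot (pivot :: t) := by
  intro n
  induction n with
  | zero =>
    intro t ht
    have : t = [] := List.length_eq_zero_iff.mp (Nat.le_zero.mp ht)
    subst this
    rw [pvS_base pivot [] (by simp)]
    simp [pvGo]
  | succ n ih =>
    intro t ht
    by_cases hp : pivot ∈ t
    · obtain ⟨v, hv⟩ := pvDropWhile_mem pivot t hp
      have hsplit : (t.takeWhile (fun x => x != pivot)) ++ pivot :: v = t := by
        rw [← hv]; exact List.takeWhile_append_dropWhile
      have hunp : pivot ∉ t.takeWhile (fun x => x != pivot) := by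
        intro hm
        have := List.mem_takeWhile_imp hm
        simp at this
      have hlenv : v.length ≤ n := by
        have := congrArg List.length hsplit
        simp at this
        omega
      rw [← hsplit, pvS_step pivot _ v hunp]
      rw [pvGo, hsplit, hv, ih v hlenv]
    · rw [pvS_base pivot t hp, pvGo,
        (pvTakeWhile_of_not_mem pivot t hp).1, (pvTakeWhile_of_not_mem pivot t hp).2]
      simp [pvGo]

/-- pvS with a non-pivot prefix -/
theorem pvS_prefix (pivot : Int) (u t : List Int) (hu : pivot ∉ u) (hne : u ≠ []) :
    pvS (u ++ pivot :: t) pivot = u :: pvS (pivot :: t) pivot := by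
  have hns := pvNatIdx_decomp pivot u t hu
  have hns₂cons : pvNatIdx pivot (pivot :: t) = 0 :: (pvNatIdx pivot t).map (· + 1) :=
    pvNatIdx_cons_pivot pivot t
  have hne₂ : pvNatIdx pivot (pivot :: t) ≠ [] := by rw [hns₂cons]; simp
  have hulen : 0 < u.length := List.length_pos_iff.mpr hne
  have htake : (u ++ pivot :: t).take u.length = u := by simp
  have hdrop : (u ++ pivot :: t).drop u.length = pivot :: t := by simp
  unfold pvS
  rw [hns]
  have hhead : ((pvNatIdx pivot (pivot :: t)).map (· + u.length)).headD 0 = u.length := by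
    rw [hns₂cons]; simp
  have hhead₂ : (pvNatIdx pivot (pivot :: t)).headD 0 = 0 := by rw [hns₂cons]; rfl
  rw [hhead, hhead₂, if_pos hulen, htake]
  simp only [lt_irrefl, if_false, List.nil_append]
  rw [pvMids_shift, hdrop]
  rw [pvLast_shift (u ++ pivot :: t) pivot u.length _ hne₂ (by simp), hdrop]
  simp

-- ========== A-side characterization ==========

theorem pvInd_eq (pivot : Int) : ∀ (xs : List Int) (s : Int),
    ((PySem.List.enumerate xs s).filter (fun p => p.2 == pivot)).map (fun p => p.1) =
      (pvNatIdx pivot xs).map (fun k : Nat => s + (k : Int)) := by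
  intro xs
  induction xs with
  | nil => intro s; simp [PySem.List.enumerate_nil, pvNatIdx]
  | cons x t ih =>
    intro s
    have hmm : List.map (fun k : Nat => s + (k : Int)) (List.map (fun a : Nat => a + 1) (pvNatIdx pivot t)) =
        List.map (fun k : Nat => (s + 1) + (k : Int)) (pvNatIdx pivot t) := by
      rw [List.map_map]
      apply List.map_congr_left
      intro a _
      simp only [Function.comp_apply]
      push_cast
      ring
    rw [PySem.List.enumerate_cons, List.filter_cons]
    by_cases hx : x = pivot
    · subst hx
      simp only [beq_self_eq_true, if_true, List.map_cons, ih (s + 1), pvNatIdx, if_pos rfl,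
        List.singleton_append, List.map_cons, Nat.cast_zero, add_zero, hmm]
    · have hb : (x == pivot) = false := by simp [hx]
      simp only [hb, Bool.false_eq_true, if_false, ih (s + 1), pvNatIdx, hx, if_false,
        List.nil_append, hmm]

/-- the A middle fold as a map over consecutive pairs (pure Nat version) -/
theorem pvMids_range (path : List Int) : ∀ (ns : List Nat),
    (List.range (ns.length - 1)).map
      (fun k => (path.drop (ns.getD k 0)).take (ns.getD (k + 1) 0 - ns.getD k 0)) =
      pvMids path ns := by
  intro ns
  induction ns with
  | nil => simp [pvMids]
  | cons a t ih =>
    cases t with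
    | nil => simp [pvMids]
    | cons b r =>
      have hlen : (a :: b :: r).length - 1 = ((b :: r).length - 1) + 1 := by simp
      rw [hlen, List.range_succ_eq_map, List.map_cons, List.map_map]
      simp only [List.getD_cons_zero, List.getD_cons_succ]
      rw [pvMids_cons₂]
      refine congrArg₂ List.cons rfl ?_
      rw [← ih]
      apply List.map_congr_left
      intro k _
      simp [Function.comp, List.getD_cons_succ]

theorem pvCast_getD (ns : List Nat) (k : Nat) (hk : k < ns.length) :
    (ns.map (fun j : Nat => (j : Int))).getD k 0 = ((ns.getD k 0 : Nat) : Int) := by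
  rw [List.getD_eq_getElem _ _ (by simpa using hk), List.getD_eq_getElem _ _ hk,
    List.getElem_map]

/-- A's middle fold equals pvMids -/
theorem pvMidFold (path : List Int) (ns : List Nat) (init : List (List Int)) :
    (PySem.List.pyRange 0 ((((ns.map (fun j : Nat => (j : Int))).length : Int)) - 1) 1).foldl
      (fun acc i => acc ++ [PySem.List.slice path
        (some (PySem.List.pyGetD (ns.map (fun j : Nat => (j : Int))) i 0))
        (some (PySem.List.pyGetD (ns.map (fun j : Nat => (j : Int))) (i + 1) 0))]) init =
      init ++ pvMids path ns := by
  rw [PySem.List.foldl_append_singleton_eq_map]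
  congr 1
  have hlen : (ns.map (fun j : Nat => (j : Int))).length = ns.length := by simp
  rw [hlen]
  have hR : PySem.List.pyRange 0 ((ns.length : Int) - 1) 1 =
      (List.range (ns.length - 1)).map (fun k => ((k : Nat) : Int)) := by
    rw [PySem.List.pyRange_one]
    have h1 : (((ns.length : Int)) - 1 - 0).toNat = ns.length - 1 := by omega
    rw [h1]
    simp
  rw [hR, List.map_map, ← pvMids_range path ns]
  apply List.map_congr_left
  intro k hk
  have hk' : k < ns.length - 1 := List.mem_range.mp hk
  simp only [Function.comp_apply]
  have h1 : PySem.List.pyGetD (ns.map (fun j : Nat => (j : Int))) (k : Int) 0 =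
      ((ns.getD k 0 : Nat) : Int) := by
    rw [PySem.List.pyGetD_natCast, pvCast_getD ns k (by omega)]
  have h2 : PySem.List.pyGetD (ns.map (fun j : Nat => (j : Int))) ((k : Int) + 1) 0 =
      ((ns.getD (k + 1) 0 : Nat) : Int) := by
    have hc : ((k : Int) + 1) = ((k + 1 : Nat) : Int) := by push_cast; ring
    rw [hc, PySem.List.pyGetD_natCast, pvCast_getD ns (k + 1) (by omega)]
  rw [h1, h2, PySem.List.slice_natCast]

theorem pvInd_last (ns : List Nat) (hne : ns ≠ []) :
    PySem.List.pyGetD (ns.map (fun j : Nat => (j : Int))) (-1) 0 = ((ns.getLastD 0 : Nat) : Int) := by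
  have hne' : ns.map (fun j : Nat => (j : Int)) ≠ [] := by
    simp only [ne_eq, List.map_eq_nil_iff]
    exact hne
  rw [PySem.List.pyGetD_neg_one _ _ hne']
  cases hn : ns.getLast? with
  | none => exact absurd (List.getLast?_eq_none_iff.mp hn) hne
  | some w =>
    have h3 := List.getLast?_eq_some_getLast (l := ns.map (fun j : Nat => (j : Int))) hne'
    rw [List.getLast?_map, hn] at h3
    simp only [Option.map_some, Option.some.injEq] at h3
    have h2 : ns.getLastD 0 = w := by rw [List.getLastD_eq_getLast?, hn]; rfl
    rw [h2, h3]

/-- A equals pvS under the precondition -/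
theorem pvA_char (path : List Int) (pivot : Int) (h : pivot ∈ path) :
    get_cycles_pivot path pivot = pvS path pivot := by
  have hns : pvNatIdx pivot path ≠ [] := pvNatIdx_ne_nil pivot path h
  have hind : ((PySem.List.enumerate path 0).filter (fun p => p.2 == pivot)).map (fun p => p.1) =
      (pvNatIdx pivot path).map (fun j : Nat => (j : Int)) := by
    rw [pvInd_eq pivot path 0]
    apply List.map_congr_left
    intro k _
    omega
  obtain ⟨a, ns', hcons⟩ := List.exists_cons_of_ne_nil hns
  simp only [get_cycles_pivot, hind]
  have h0 : PySem.List.pyGetD ((pvNatIdx pivot path).map (fun j : Nat => (j : Int))) 0 0 =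
      ((a : Nat) : Int) := by
    rw [hcons, List.map_cons, PySem.List.pyGetD_zero_cons]
  have hhead : (pvNatIdx pivot path).headD 0 = a := by rw [hcons]; rfl
  have h1 : (if PySem.List.pyGetD ((pvNatIdx pivot path).map (fun j : Nat => (j : Int))) 0 0 > 0 then
      ([] : List (List Int)) ++ [PySem.List.slice path none
        (some (PySem.List.pyGetD ((pvNatIdx pivot path).map (fun j : Nat => (j : Int))) 0 0))]
      else []) =
      (if 0 < (pvNatIdx pivot path).headD 0 then [path.take ((pvNatIdx pivot path).headD 0)] else []) := by
    rw [h0, hhead]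
    by_cases ha : 0 < a
    · rw [if_pos (by exact_mod_cast ha), if_pos ha, PySem.List.slice_to_natCast, List.nil_append]
    · rw [if_neg (by exact_mod_cast ha), if_neg ha]
  rw [h1]
  have h2 : ∀ init : List (List Int),
      (if ((pvNatIdx pivot path).map (fun j : Nat => (j : Int))).length ≥ 2 then
        (PySem.List.pyRange 0 ((((pvNatIdx pivot path).map (fun j : Nat => (j : Int))).length : Int) - 1) 1).foldl
          (fun acc i => acc ++ [PySem.List.slice path
            (some (PySem.List.pyGetD ((pvNatIdx pivot path).map (fun j : Nat => (j : Int))) i 0))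
            (some (PySem.List.pyGetD ((pvNatIdx pivot path).map (fun j : Nat => (j : Int))) (i + 1) 0))]) init
      else init) = init ++ pvMids path (pvNatIdx pivot path) := by
    intro init
    cases hns' : ns' with
    | nil =>
      rw [hcons, hns']
      rw [if_neg (by simp)]
      rw [pvMids_single, List.append_nil]
    | cons b r =>
      rw [if_pos (by rw [hcons, hns']; simp)]
      exact pvMidFold path (pvNatIdx pivot path) init
  rw [h2]
  have h3 : PySem.List.pyGetD ((pvNatIdx pivot path).map (fun j : Nat => (j : Int))) (-1) 0 =
      (((pvNatIdx pivot path).getLastD 0 : Nat) : Int) := pvInd_last (pvNatIdx pivot path) hns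
  rw [h3]
  unfold pvS
  by_cases hc : (pvNatIdx pivot path).getLastD 0 + 1 < path.length
  · rw [if_pos (by push_cast; omega), PySem.List.slice_from_natCast]
    unfold pvLast
    rw [if_pos hc]
  · rw [if_neg (by push_cast; omega)]
    unfold pvLast
    rw [if_neg hc]

-- ========== B-side characterization ==========

theorem pvB_loop (pivot : Int) : ∀ (l : List Int) (res : List (List Int)) (cur : List Int), cur ≠ [] →
    (l.foldl
      (fun (st : List (List Int) × List Int) x =>
        if x == pivot then (if st.2.isEmpty then st.1 else st.1 ++ [st.2], [x])
        else (st.1, st.2 ++ [x])) (res, cur)).1 ++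
      [(l.foldl
        (fun (st : List (List Int) × List Int) x =>
          if x == pivot then (if st.2.isEmpty then st.1 else st.1 ++ [st.2], [x])
          else (st.1, st.2 ++ [x])) (res, cur)).2] =
    res ++ ((cur ++ l.takeWhile (fun x => x != pivot)) :: pvGo pivot (l.dropWhile (fun x => x != pivot))) := by
  intro l
  induction l with
  | nil =>
    intro res cur hc
    simp [pvGo]
  | cons x t ih =>
    intro res cur hc
    by_cases hx : x = pivot
    · have hbe : (x == pivot) = true := by simp [hx]
      have hie : cur.isEmpty = false := by simp [List.isEmpty_iff]; exact hc
      simp only [List.foldl_cons, hbe, if_true, hie, Bool.false_eq_true, if_false]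
      rw [ih (res ++ [cur]) [x] (by simp)]
      have hbx : (x != pivot) = false := by simp [hx]
      rw [List.takeWhile_cons, List.dropWhile_cons]
      simp only [hbx, Bool.false_eq_true, if_false]
      rw [hx, pvGo]
      simp
    · have hbe : (x == pivot) = false := by simp [hx]
      simp only [List.foldl_cons, hbe, Bool.false_eq_true, if_false]
      rw [ih res (cur ++ [x]) (by simp)]
      have hbx : (x != pivot) = true := by simp [bne_iff_ne]; exact hx
      rw [List.takeWhile_cons, List.dropWhile_cons]
      simp only [hbx, if_true]
      simp

/-- B equals prefix + segmenter under the precondition -/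
theorem pvB_char (path : List Int) (pivot : Int) (h : pivot ∈ path) :
    get_cycles_pivot_alt path pivot =
      (if path.takeWhile (fun x => x != pivot) = [] then []
        else [path.takeWhile (fun x => x != pivot)]) ++
        pvGo pivot (path.dropWhile (fun x => x != pivot)) := by
  have hcont : path.contains pivot = true := by simpa using h
  simp only [get_cycles_pivot_alt, hcont, Bool.not_true, Bool.false_eq_true, if_false]
  cases path with
  | nil => simp at h
  | cons x t =>
    simp only [List.foldl_cons]
    have hfirst : (if x == pivot then
        (if (([] : List (List Int)), ([] : List Int)).2.isEmpty then (([] : List (List Int)), ([] : List Int)).1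
          else (([] : List (List Int)), ([] : List Int)).1 ++ [(([] : List (List Int)), ([] : List Int)).2], [x])
        else ((([] : List (List Int)), ([] : List Int)).1, (([] : List (List Int)), ([] : List Int)).2 ++ [x])) =
        (([] : List (List Int)), [x]) := by
      by_cases hx : x = pivot <;> simp [hx]
    rw [hfirst, pvB_loop pivot t [] [x] (by simp)]
    by_cases hx : x = pivot
    · have hbx : (x != pivot) = false := by simp [hx]
      rw [List.takeWhile_cons, List.dropWhile_cons]
      simp only [hbx, Bool.false_eq_true, if_false, if_pos rfl]
      rw [hx, pvGo]
      simp
    · have hbx : (x != pivot) = true := by simp [bne_iff_ne]; exact hx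
      rw [List.takeWhile_cons, List.dropWhile_cons]
      simp only [hbx, if_true]
      simp

-- ===== VERDICT (by name: the statement is the Claim_ definition above) =====
theorem get_cycles_pivot_spec : Claim_equal_get_cycles_pivot := by
  unfold Claim_equal_get_cycles_pivot
  intro path pivot _ hpre
  unfold Spec_get_cycles_pivot
  unfold Pre_get_cycles_pivot at hpre
  obtain ⟨v, hv⟩ := pvDropWhile_mem pivot path hpre
  have hsplit : (path.takeWhile (fun x => x != pivot)) ++ pivot :: v = path := by
    rw [← hv]; exact List.takeWhile_append_dropWhile
  have hunp : pivot ∉ path.takeWhile (fun x => x != pivot) := by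
    intro hm
    have := List.mem_takeWhile_imp hm
    simp at this
  rw [pvA_char path pivot hpre, pvB_char path pivot hpre, hv]
  by_cases hue : path.takeWhile (fun x => x != pivot) = []
  · rw [if_pos hue]
    rw [← hsplit, hue, List.nil_append]
    rw [pvS_go pivot v.length v le_rfl]
    simp
  · rw [if_neg hue]
    conv_lhs => rw [← hsplit]
    rw [pvS_prefix pivot _ v hunp hue, pvS_go pivot v.length v le_rfl]
    simp
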